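-- pv_equiv track=rewrite | github.com/HolyChlamys/RailwayMap | railway-scripts/grid_splitter.py | snake_sort
-- ===== SOURCE A (Python) =====
-- def snake_sort(queue: list) -> list:
--     """
--     蛇形排序 (S-curve): 偶数行正向, 奇数行反向
--     减少 Overpass API 连续请求间的空间跳跃
--     """
--     rows = {}
--     for item in queue:
--         r = item["row"]
--         rows.setdefault(r, []).append(item)
--
--     result = []
--     for r in sorted(rows.keys()):
--         items = sorted(rows[r], key=lambda g: g["col"])
--         if r % 2 == 1:
--             items.reverse()
--         result.extend(items)
--
--     return result
-- ===== SOURCE B (Python) =====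
-- from itertools import groupby
--
--
-- def snake_sort(queue: list) -> list:
--     """
--     蛇形排序 (S-curve): 偶数行正向, 奇数行反向
--     减少 Overpass API 连续请求间的空间跳跃
--     """
--     ordered = sorted(queue, key=lambda i: (i["row"], i["col"]))
--     result = []
--     for row, group in groupby(ordered, key=lambda i: i["row"]):
--         items = list(group)
--         if row % 2 == 1:
--             items.reverse()
--         result.extend(items)
--     return result
-- ===== Notes on version B (the rewrite author's own statement) =====
-- stated objective: alternative
-- what changed: Replaces A's dict-of-rows grouping followed by sorting the row keys and re-sorting each row's bucket by col with one stable global sort by the (row, col) tuple followed by a single linear grouping pass over consecutive equal rows, reversing each odd-row run.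
import Mathlib
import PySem

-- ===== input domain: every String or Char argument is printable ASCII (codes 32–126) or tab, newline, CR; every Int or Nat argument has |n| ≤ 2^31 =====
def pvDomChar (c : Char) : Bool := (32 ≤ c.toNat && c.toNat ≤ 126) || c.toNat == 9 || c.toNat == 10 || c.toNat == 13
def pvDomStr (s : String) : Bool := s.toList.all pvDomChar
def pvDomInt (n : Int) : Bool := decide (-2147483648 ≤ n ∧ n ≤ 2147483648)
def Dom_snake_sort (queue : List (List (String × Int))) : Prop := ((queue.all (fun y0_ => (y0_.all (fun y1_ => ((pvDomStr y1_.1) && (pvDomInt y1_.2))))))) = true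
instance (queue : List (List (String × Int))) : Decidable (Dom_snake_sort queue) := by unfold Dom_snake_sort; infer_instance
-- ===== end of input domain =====

-- B replaces A's dict-of-rows + per-row sort with one global stable (row, col) sort
-- and a single consecutive-grouping pass (objective: alternative decomposition, same cost).

-- item[k] for a dict item: first-match lookup; the default 0 is only reached outside
-- Pre_snake_sort (where the Python raises KeyError).
def pvKey (item : List (String × Int)) (k : String) : Int :=
  match item.find? (fun p => p.1 == k) with
  | some p => p.2
  | none => 0

-- ===== PORT A =====
def snake_sort (queue : List (List (String × Int))) : List (List (String × Int)) :=
  -- rows = {}; for item in queue: rows.setdefault(item["row"], []).append(item)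
  let rows : PySem.Dict Int (List (List (String × Int))) :=
    queue.foldl (fun d item => d.modify (pvKey item "row") [] (fun l => l ++ [item]))
      PySem.Dict.empty
  -- result = []; for r in sorted(rows.keys()): …
  (PySem.List.sorted rows.keys (fun r => r) false).foldl
    (fun result r =>
      let items := PySem.List.sorted (rows.getD r []) (fun g => pvKey g "col") false
      let items := if PySem.Int.mod r 2 == 1 then items.reverse else items
      result ++ items) []

-- ===== PORT B =====
-- itertools.groupby(·, key=lambda i: i["row"]): consecutive runs of equal row
def pvGroups : List (List (String × Int)) → List (Int × List (List (String × Int)))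
  | [] => []
  | x :: xs =>
    match pvGroups xs with
    | [] => [(pvKey x "row", [x])]
    | (r, g) :: t =>
      if pvKey x "row" == r then (r, x :: g) :: t
      else (pvKey x "row", [x]) :: (r, g) :: t

def snake_sort_alt (queue : List (List (String × Int))) : List (List (String × Int)) :=
  -- ordered = sorted(queue, key=lambda i: (i["row"], i["col"]))
  let ordered := PySem.List.sorted2 queue (fun i => pvKey i "row") (fun i => pvKey i "col") false
  -- for row, group in groupby(ordered, …): reverse odd rows, extend
  (pvGroups ordered).foldl
    (fun result g =>
      result ++ (if PySem.Int.mod g.1 2 == 1 then g.2.reverse else g.2)) []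

-- ===== PRECONDITION & SPEC =====
-- Pre_: every item has the keys "row" and "col"; on any other input the Python A
-- (and B) raises KeyError.
def Pre_snake_sort (queue : List (List (String × Int))) : Prop :=
  ∀ item ∈ queue, (item.any (fun p => p.1 == "row")) = true ∧ (item.any (fun p => p.1 == "col")) = true
instance (queue : List (List (String × Int))) : Decidable (Pre_snake_sort queue) := by unfold Pre_snake_sort; infer_instance
def pvWitness_snake_sort : (List (List (String × Int))) := [[("row", 1), ("col", 2)], [("row", 0), ("col", 5)]]

def Spec_snake_sort (queue : List (List (String × Int))) (out : List (List (String × Int))) : Prop := out = snake_sort_alt queue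
instance (queue : List (List (String × Int))) (out : List (List (String × Int))) : Decidable (Spec_snake_sort queue out) := by unfold Spec_snake_sort; infer_instance

-- ===== CLAIM (what is proved, stated in full; the proofs are below) =====
def Claim_equal_snake_sort : Prop := ∀ (queue : List (List (String × Int))), Dom_snake_sort queue → Pre_snake_sort queue → Spec_snake_sort queue (snake_sort queue)

-- ===== LEMMAS AND PROOFS =====

-- shared canonical form: the sorted distinct rows, and the per-row block sorted by col
def pvRowsOf (queue : List (List (String × Int))) : List Int :=
  PySem.List.sorted (PySem.Set.ofList (queue.map (fun i => pvKey i "row"))) (fun r => r) false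

def pvBlk (queue : List (List (String × Int))) (r : Int) : List (List (String × Int)) :=
  PySem.List.sorted (queue.filter (fun i => pvKey i "row" == r)) (fun g => pvKey g "col") false

def pvLex (x y : List (String × Int)) : Bool :=
  decide (pvKey x "row" < pvKey y "row") ||
    (!decide (pvKey y "row" < pvKey x "row") && decide (pvKey x "col" < pvKey y "col"))

-- insertBy facts
theorem insertBy_all_before {α : Type} (before : α → α → Bool) (x : α) (l : List α)
    (h : ∀ y ∈ l, before x y = true) : PySem.List.insertBy before x l = x :: l := by
  cases l with
  | nil => rfl
  | cons a t => simp [PySem.List.insertBy, h a (by simp)]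

theorem insertBy_append_left {α : Type} (before : α → α → Bool) (x : α) (l₁ l₂ : List α)
    (h : ∀ y ∈ l₁, before x y = false) :
    PySem.List.insertBy before x (l₁ ++ l₂) = l₁ ++ PySem.List.insertBy before x l₂ := by
  induction l₁ with
  | nil => simp
  | cons a t ih =>
    have ha : before x a = false := h a (by simp)
    simp [PySem.List.insertBy, ha, ih (fun y hy => h y (by simp [hy]))]

theorem insertBy_append_right {α : Type} (before : α → α → Bool) (x : α) (l₁ l₂ : List α)
    (h : ∀ y ∈ l₂, before x y = true) :
    PySem.List.insertBy before x (l₁ ++ l₂) = PySem.List.insertBy before x l₁ ++ l₂ := by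
  induction l₁ with
  | nil => simp [PySem.List.insertBy, insertBy_all_before before x l₂ h]
  | cons a t ih =>
    by_cases ha : before x a = true
    · simp [PySem.List.insertBy, ha]
    · simp only [Bool.not_eq_true] at ha
      simp [PySem.List.insertBy, ha, ih]

theorem insertBy_congr {α : Type} (before before' : α → α → Bool) (x : α) (l : List α)
    (h : ∀ y ∈ l, before x y = before' x y) :
    PySem.List.insertBy before x l = PySem.List.insertBy before' x l := by
  induction l with
  | nil => rfl
  | cons a t ih =>
    have ha := h a (by simp)
    by_cases hb : before x a = true
    · simp [PySem.List.insertBy, hb, ha ▸ hb]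
    · simp only [Bool.not_eq_true] at hb
      simp [PySem.List.insertBy, hb, ha ▸ hb, ih (fun y hy => h y (by simp [hy]))]

theorem flatMap_congr_mem {α β : Type} (l : List α) (f g : α → List β)
    (h : ∀ x ∈ l, f x = g x) : l.flatMap f = l.flatMap g := by
  induction l with
  | nil => rfl
  | cons a t ih => simp [List.flatMap_cons, h a (by simp), ih (fun y hy => h y (by simp [hy]))]

-- a strictly increasing list splits at r0 into its <, =, > parts
theorem pairwise_split3 (R : List Int) (h : R.Pairwise (· < ·)) (r0 : Int) :
    R = R.filter (fun a => decide (a < r0)) ++ R.filter (fun a => decide (a = r0)) ++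
        R.filter (fun a => decide (r0 < a)) := by
  induction R with
  | nil => rfl
  | cons a t ih =>
    have hlt : ∀ b ∈ t, a < b := (List.pairwise_cons.mp h).1
    have ht := ih ((List.pairwise_cons.mp h).2)
    rcases lt_trichotomy a r0 with hc | hc | hc
    · simp only [List.filter_cons, decide_eq_true hc]
      simp only [show decide (a = r0) = false by simp; omega,
        show decide (r0 < a) = false by simp; omega]
      simpa using ht
    · subst hc
      have h1 : t.filter (fun b => decide (b < a)) = [] :=
        List.filter_eq_nil_iff.mpr (fun b hb => by have := hlt b hb; simp; omega)
      have h2 : t.filter (fun b => decide (b = a)) = [] :=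
        List.filter_eq_nil_iff.mpr (fun b hb => by have := hlt b hb; simp; omega)
      have h3 : t.filter (fun b => decide (a < b)) = t :=
        List.filter_eq_self.mpr (fun b hb => by simp [hlt b hb])
      simp [h1, h2, h3]
    · have h1 : (a :: t).filter (fun b => decide (b < r0)) = [] :=
        List.filter_eq_nil_iff.mpr (fun b hb => by
          simp at hb ⊢
          rcases hb with rfl | hb
          · omega
          · have := hlt b hb; omega)
      have h2 : (a :: t).filter (fun b => decide (b = r0)) = [] :=
        List.filter_eq_nil_iff.mpr (fun b hb => by
          simp at hb ⊢
          rcases hb with rfl | hb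
          · omega
          · have := hlt b hb; omega)
      have h3 : (a :: t).filter (fun b => decide (r0 < b)) = a :: t :=
        List.filter_eq_self.mpr (fun b hb => by
          simp at hb ⊢
          rcases hb with rfl | hb
          · omega
          · have := hlt b hb; omega)
      simp [h1, h2, h3]

theorem filter_eq_singleton (R : List Int) (h : R.Pairwise (· < ·)) (r0 : Int) (hm : r0 ∈ R) :
    R.filter (fun a => decide (a = r0)) = [r0] := by
  induction R with
  | nil => simp at hm
  | cons a t ih =>
    have hlt : ∀ b ∈ t, a < b := (List.pairwise_cons.mp h).1
    rcases List.mem_cons.mp hm with heq | hm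
    · have h2 : t.filter (fun b => decide (b = r0)) = [] :=
        List.filter_eq_nil_iff.mpr (fun b hb => by have := hlt b hb; simp; omega)
      simp [heq ▸ h2, heq]
    · have hne : a ≠ r0 := by have := hlt r0 hm; omega
      simp [hne, ih ((List.pairwise_cons.mp h).2) hm]

theorem snake_sort_eq_blocks_A (queue : List (List (String × Int))) :
    snake_sort queue = (pvRowsOf queue).flatMap
      (fun r => if PySem.Int.mod r 2 == 1 then (pvBlk queue r).reverse else pvBlk queue r) := by
  have hfold : queue.foldl
      (fun d item => d.modify (pvKey item "row") [] (fun l => l ++ [item])) PySem.Dict.empty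
      = (queue.map (fun i => ((pvKey i "row"), i))).foldl
          (fun d p => d.modify p.1 [] (fun l => l ++ [p.2])) PySem.Dict.empty := by
    rw [List.foldl_map]
  have hkeys : (queue.foldl
      (fun d item => d.modify (pvKey item "row") [] (fun l => l ++ [item])) PySem.Dict.empty).keys
      = PySem.Set.ofList (queue.map (fun i => pvKey i "row")) := by
    rw [PySem.Dict.keys_foldl_modify_key queue (fun i => pvKey i "row") []
      (fun _ item => fun l => l ++ [item]) PySem.Dict.empty]
    simp [PySem.Set.update, PySem.Set.ofList_eq_foldl, PySem.Dict.keys_empty]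
  have hgetD : ∀ r : Int, (queue.foldl
      (fun d item => d.modify (pvKey item "row") [] (fun l => l ++ [item])) PySem.Dict.empty).getD r []
      = queue.filter (fun i => pvKey i "row" == r) := by
    intro r
    rw [hfold, PySem.Dict.getD_foldl_modify_append]
    simp [List.filter_map, List.map_map, Function.comp_def]
  simp only [snake_sort]
  simp only [hkeys, hgetD]
  rw [PySem.List.foldl_append_eq_flatMap
    (g := fun r => if PySem.Int.mod r 2 == 1
      then (PySem.List.sorted (queue.filter (fun i => pvKey i "row" == r)) (fun g => pvKey g "col") false).reverse
      else PySem.List.sorted (queue.filter (fun i => pvKey i "row" == r)) (fun g => pvKey g "col") false)]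
  simp [pvRowsOf, pvBlk]

theorem mem_blk_row (queue : List (List (String × Int))) (r : Int)
    (i : List (String × Int)) (hi : i ∈ pvBlk queue r) : pvKey i "row" = r := by
  rw [pvBlk, PySem.List.mem_sorted] at hi
  simpa using (List.mem_filter.mp hi).2

theorem blk_ne_nil (queue : List (List (String × Int))) (r : Int)
    (hr : r ∈ pvRowsOf queue) : pvBlk queue r ≠ [] := by
  rw [pvRowsOf, PySem.List.mem_sorted, PySem.Set.mem_ofList, List.mem_map] at hr
  obtain ⟨i, hi, hrow⟩ := hr
  rw [pvBlk]
  rw [Ne, PySem.List.sorted_eq_nil_iff, List.filter_eq_nil_iff]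
  intro h
  exact h i hi (by simp [hrow])

theorem sorted_append_singleton {α κ : Type} [LT κ] [DecidableLT κ]
    (l : List α) (x : α) (key : α → κ) :
    PySem.List.sorted (l ++ [x]) key false
      = PySem.List.insertBy (fun a b => decide (key a < key b)) x (PySem.List.sorted l key false) := by
  rw [PySem.List.sorted_eq_foldl_insertBy, PySem.List.sorted_eq_foldl_insertBy, List.foldl_append]
  rfl

theorem sorted2_eq_blocks (queue : List (List (String × Int))) :
    PySem.List.sorted2 queue (fun i => pvKey i "row") (fun i => pvKey i "col") false =
      (pvRowsOf queue).flatMap (pvBlk queue) := by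
  induction queue using List.reverseRecOn with
  | nil => rfl
  | append_singleton xs x ih =>
    have hstep : PySem.List.sorted2 (xs ++ [x]) (fun i => pvKey i "row") (fun i => pvKey i "col") false
        = PySem.List.insertBy pvLex x
            (PySem.List.sorted2 xs (fun i => pvKey i "row") (fun i => pvKey i "col") false) := by
      simp only [PySem.List.sorted2, List.foldl_append, List.foldl_cons, List.foldl_nil]
      rfl
    have hR : (pvRowsOf xs).Pairwise (· < ·) := PySem.List.sorted_ofList_pairwise_lt _
    have hsplit := pairwise_split3 (pvRowsOf xs) hR (pvKey x "row")
    have hLtlt : ∀ a ∈ (pvRowsOf xs).filter (fun a => decide (a < pvKey x "row")),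
        a < pvKey x "row" := fun a ha => by
      have := (List.mem_filter.mp ha).2; simpa using this
    have hGtgt : ∀ a ∈ (pvRowsOf xs).filter (fun a => decide (pvKey x "row" < a)),
        pvKey x "row" < a := fun a ha => by
      have := (List.mem_filter.mp ha).2; simpa using this
    have hlex_lt : ∀ y, pvKey y "row" < pvKey x "row" → pvLex x y = false := by
      intro y hy
      simp [pvLex, hy, show ¬(pvKey x "row" < pvKey y "row") from by omega]
    have hlex_gt : ∀ y, pvKey x "row" < pvKey y "row" → pvLex x y = true := by
      intro y hy; simp [pvLex, hy]
    have hlex_eq : ∀ y, pvKey y "row" = pvKey x "row" →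
        pvLex x y = decide (pvKey x "col" < pvKey y "col") := by
      intro y hy; simp [pvLex, hy]
    have hmemLt : ∀ y ∈ ((pvRowsOf xs).filter (fun a => decide (a < pvKey x "row"))).flatMap (pvBlk xs),
        pvLex x y = false := by
      intro y hy
      obtain ⟨r, hr, hyb⟩ := List.mem_flatMap.mp hy
      have h1 := mem_blk_row xs r y hyb
      exact hlex_lt y (by rw [h1]; exact hLtlt r hr)
    have hmemGt : ∀ y ∈ ((pvRowsOf xs).filter (fun a => decide (pvKey x "row" < a))).flatMap (pvBlk xs),
        pvLex x y = true := by
      intro y hy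
      obtain ⟨r, hr, hyb⟩ := List.mem_flatMap.mp hy
      have h1 := mem_blk_row xs r y hyb
      exact hlex_gt y (by rw [h1]; exact hGtgt r hr)
    have hblk : ∀ r : Int, pvBlk (xs ++ [x]) r =
        if pvKey x "row" = r then
          PySem.List.insertBy (fun a b => decide (pvKey a "col" < pvKey b "col")) x (pvBlk xs r)
        else pvBlk xs r := by
      intro r
      simp only [pvBlk, List.filter_append]
      by_cases h : pvKey x "row" = r
      · have hx : (List.filter (fun i => pvKey i "row" == r) [x]) = [x] := by
          simp [h]
        rw [hx, if_pos h, sorted_append_singleton]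
      · have hx : (List.filter (fun i => pvKey i "row" == r) [x]) = [] := by
          simp [h]
        rw [hx, List.append_nil, if_neg h]
    have hcongrLt : ((pvRowsOf xs).filter (fun a => decide (a < pvKey x "row"))).flatMap (pvBlk (xs ++ [x]))
        = ((pvRowsOf xs).filter (fun a => decide (a < pvKey x "row"))).flatMap (pvBlk xs) := by
      refine flatMap_congr_mem _ _ _ (fun r hr => ?_)
      rw [hblk r, if_neg (by have := hLtlt r hr; omega)]
    have hcongrGt : ((pvRowsOf xs).filter (fun a => decide (pvKey x "row" < a))).flatMap (pvBlk (xs ++ [x]))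
        = ((pvRowsOf xs).filter (fun a => decide (pvKey x "row" < a))).flatMap (pvBlk xs) := by
      refine flatMap_congr_mem _ _ _ (fun r hr => ?_)
      rw [hblk r, if_neg (by have := hGtgt r hr; omega)]
    have hofl : PySem.Set.ofList ((xs ++ [x]).map (fun i => pvKey i "row"))
        = PySem.Set.add (PySem.Set.ofList (xs.map (fun i => pvKey i "row"))) (pvKey x "row") := by
      rw [PySem.Set.ofList_eq_foldl, PySem.Set.ofList_eq_foldl, List.map_append, List.foldl_append]
      rfl
    have hRS : (pvRowsOf xs).Perm (PySem.Set.ofList (xs.map (fun i => pvKey i "row"))) :=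
      PySem.List.sorted_perm _ _ _
    rw [hstep, ih]
    by_cases hmem : pvKey x "row" ∈ PySem.Set.ofList (xs.map (fun i => pvKey i "row"))
    · -- the new item's row already exists: x lands inside that row's block
      have hadd : PySem.Set.add (PySem.Set.ofList (xs.map (fun i => pvKey i "row"))) (pvKey x "row")
          = PySem.Set.ofList (xs.map (fun i => pvKey i "row")) := by
        simp [PySem.Set.add, PySem.Set.contains, hmem]
      have hrows : pvRowsOf (xs ++ [x]) = pvRowsOf xs := by
        simp only [pvRowsOf]
        rw [hofl, hadd]
      have hmid : (pvRowsOf xs).filter (fun a => decide (a = pvKey x "row")) = [pvKey x "row"] :=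
        filter_eq_singleton _ hR _ (hRS.mem_iff.mpr hmem)
      rw [hrows]
      conv_lhs => rw [hsplit, hmid]
      conv_rhs => rw [hsplit, hmid]
      simp only [List.flatMap_append, List.flatMap_cons, List.flatMap_nil, List.append_nil]
      rw [hcongrLt, hcongrGt, hblk (pvKey x "row"), if_pos rfl, List.append_assoc, List.append_assoc,
        insertBy_append_left pvLex x _ _ hmemLt,
        insertBy_append_right pvLex x _ _ hmemGt,
        insertBy_congr pvLex (fun a b => decide (pvKey a "col" < pvKey b "col")) x _
          (fun y hy => hlex_eq y (mem_blk_row xs (pvKey x "row") y hy))]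
    · -- the new item's row is new: x becomes a fresh singleton block
      have hadd : PySem.Set.add (PySem.Set.ofList (xs.map (fun i => pvKey i "row"))) (pvKey x "row")
          = PySem.Set.ofList (xs.map (fun i => pvKey i "row")) ++ [pvKey x "row"] := by
        simp only [PySem.Set.add, PySem.Set.contains]
        rw [if_neg (by simp [hmem])]
      have hmid : (pvRowsOf xs).filter (fun a => decide (a = pvKey x "row")) = [] :=
        List.filter_eq_nil_iff.mpr (fun a ha => by
          simp only [decide_eq_true_eq]
          intro h
          exact hmem (hRS.mem_iff.mp (h ▸ ha)))
      have hRLG : pvRowsOf xs = (pvRowsOf xs).filter (fun a => decide (a < pvKey x "row"))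
          ++ (pvRowsOf xs).filter (fun a => decide (pvKey x "row" < a)) := by
        conv_lhs => rw [hsplit, hmid]
        simp
      have hrows : pvRowsOf (xs ++ [x]) = (pvRowsOf xs).filter (fun a => decide (a < pvKey x "row"))
          ++ pvKey x "row" :: (pvRowsOf xs).filter (fun a => decide (pvKey x "row" < a)) := by
        simp only [pvRowsOf]
        rw [hofl, hadd]
        refine PySem.List.sorted_eq_of_perm_of_pairwise_lt _ _ _ ?_ ?_
        · have p1 := List.perm_middle (a := pvKey x "row")
            (l₁ := (pvRowsOf xs).filter (fun a => decide (a < pvKey x "row")))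
            (l₂ := (pvRowsOf xs).filter (fun a => decide (pvKey x "row" < a)))
          rw [← hRLG] at p1
          exact p1.trans ((hRS.cons (pvKey x "row")).trans
            (List.perm_append_singleton (pvKey x "row") _).symm)
        · rw [List.pairwise_append]
          refine ⟨hR.sublist List.filter_sublist, ?_, ?_⟩
          · rw [List.pairwise_cons]
            exact ⟨fun b hb => hGtgt b hb, hR.sublist List.filter_sublist⟩
          · intro a ha b hb
            have h1 := hLtlt a ha
            rcases List.mem_cons.mp hb with rfl | hb
            · omega
            · have := hGtgt b hb; omega
      have hblk0 : pvBlk xs (pvKey x "row") = [] := by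
        rw [pvBlk, PySem.List.sorted_eq_nil_iff, List.filter_eq_nil_iff]
        intro i hi
        simp only [beq_iff_eq]
        intro h
        exact hmem (by rw [PySem.Set.mem_ofList]; exact List.mem_map.mpr ⟨i, hi, h⟩)
      rw [hrows]
      conv_lhs => rw [hRLG]
      simp only [List.flatMap_append, List.flatMap_cons]
      rw [hcongrLt, hcongrGt, hblk (pvKey x "row"), if_pos rfl, hblk0,
        insertBy_append_left pvLex x _ _ hmemLt,
        insertBy_all_before pvLex x _ hmemGt]
      rfl

theorem pvGroups_append_block (b l : List (List (String × Int))) (r : Int)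
    (hb : b ≠ []) (hrow : ∀ i ∈ b, pvKey i "row" = r)
    (hhd : ∀ r' g t, pvGroups l = (r', g) :: t → r' ≠ r) :
    pvGroups (b ++ l) = (r, b) :: pvGroups l := by
  induction b with
  | nil => exact absurd rfl hb
  | cons i b ih =>
    have hi : pvKey i "row" = r := hrow i (by simp)
    cases b with
    | nil =>
      show pvGroups (i :: l) = _
      rw [pvGroups]
      cases hgl : pvGroups l with
      | nil => simp [hi]
      | cons p t =>
        obtain ⟨r', g⟩ := p
        have : r' ≠ r := hhd r' g t hgl
        simp [hi, Ne.symm this]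
    | cons j b' =>
      have ihe := ih (by simp) (fun y hy => hrow y (by simp [List.mem_cons] at hy ⊢; tauto))
      show pvGroups (i :: (j :: b' ++ l)) = _
      rw [pvGroups, ihe]
      simp [hi]

theorem pvGroups_flatMap (R : List Int) (B : Int → List (List (String × Int)))
    (hp : R.Pairwise (· < ·)) (hne : ∀ r ∈ R, B r ≠ [])
    (hrow : ∀ r ∈ R, ∀ i ∈ B r, pvKey i "row" = r) :
    pvGroups (R.flatMap B) = R.map (fun r => (r, B r)) := by
  induction R with
  | nil => rfl
  | cons r R' ih =>
    have hlt : ∀ b ∈ R', r < b := (List.pairwise_cons.mp hp).1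
    have ihe := ih ((List.pairwise_cons.mp hp).2) (fun s hs => hne s (by simp [hs]))
      (fun s hs => hrow s (by simp [hs]))
    rw [List.flatMap_cons,
      pvGroups_append_block (B r) (R'.flatMap B) r (hne r (by simp))
        (hrow r (by simp))
        (by
          intro r' g t hgl
          rw [ihe] at hgl
          cases R' with
          | nil => simp at hgl
          | cons s S =>
            simp only [List.map_cons, List.cons.injEq, Prod.mk.injEq] at hgl
            have := hlt s (by simp)
            omega)]
    simp [ihe]

theorem snake_sort_alt_eq_blocks (queue : List (List (String × Int))) :
    snake_sort_alt queue = (pvRowsOf queue).flatMap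
      (fun r => if PySem.Int.mod r 2 == 1 then (pvBlk queue r).reverse else pvBlk queue r) := by
  simp only [snake_sort_alt]
  rw [sorted2_eq_blocks, pvGroups_flatMap (pvRowsOf queue) (pvBlk queue)
    (PySem.List.sorted_ofList_pairwise_lt _) (blk_ne_nil queue) (fun r _ => mem_blk_row queue r),
    List.foldl_map,
    PySem.List.foldl_append_eq_flatMap
      (g := fun r => if PySem.Int.mod r 2 == 1 then (pvBlk queue r).reverse else pvBlk queue r)]
  simp

-- ===== VERDICT (by name: the statement is the Claim_ definition above) =====
theorem snake_sort_spec : Claim_equal_snake_sort := by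
  intro queue _ _
  unfold Spec_snake_sort
  rw [snake_sort_eq_blocks_A, snake_sort_alt_eq_blocks]
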